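-- pv_equiv track=rewrite | github.com/kartikeybihani/AI-wizard | project/utils/engage.py | infer_blake_bucket
-- ===== SOURCE A (Python) =====
-- from typing import Any, Dict, List, Optional, Sequence, Tuple
--
-- def infer_blake_bucket(topic_tags: Sequence[str], tone_guess: str) -> str:
--     tags = {str(item).strip().lower() for item in topic_tags}
--     tone = str(tone_guess or "").strip().lower()
--
--     if tags.intersection({"depression", "anxiety", "burnout", "healing"}):
--         return "crisis_and_identity_reset"
--     if tags.intersection({"self_worth"}):
--         return "enough_era"
--     if tags.intersection({"purpose"}):
--         return "origin_and_revolution"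
--     if tags.intersection({"relationships"}):
--         return "enough_era"
--     if tone in {"vulnerable", "reflective"}:
--         return "enough_era"
--     return "scale_and_public_impact"
-- ===== SOURCE B (Python) =====
-- _PRIORITY = {"depression": 0, "anxiety": 0, "burnout": 0, "healing": 0,
--              "self_worth": 1, "purpose": 2, "relationships": 3}
-- _BUCKET = {0: "crisis_and_identity_reset", 1: "enough_era",
--            2: "origin_and_revolution", 3: "enough_era"}
--
--
-- def infer_blake_bucket(topic_tags, tone_guess):
--     best = 4
--     for item in topic_tags:
--         best = min(best, _PRIORITY.get(str(item).strip().lower(), 4))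
--     if best in _BUCKET:
--         return _BUCKET[best]
--     if str(tone_guess or "").strip().lower() in ("vulnerable", "reflective"):
--         return "enough_era"
--     return "scale_and_public_impact"
-- ===== Notes on version B (the rewrite author's own statement) =====
-- stated objective: simpler
-- what changed: Replaces the four ordered set-intersection branches by a single pass that folds a min over a tag-to-priority table and maps the best priority to its bucket, falling back to the tone check.
import Mathlib
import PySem

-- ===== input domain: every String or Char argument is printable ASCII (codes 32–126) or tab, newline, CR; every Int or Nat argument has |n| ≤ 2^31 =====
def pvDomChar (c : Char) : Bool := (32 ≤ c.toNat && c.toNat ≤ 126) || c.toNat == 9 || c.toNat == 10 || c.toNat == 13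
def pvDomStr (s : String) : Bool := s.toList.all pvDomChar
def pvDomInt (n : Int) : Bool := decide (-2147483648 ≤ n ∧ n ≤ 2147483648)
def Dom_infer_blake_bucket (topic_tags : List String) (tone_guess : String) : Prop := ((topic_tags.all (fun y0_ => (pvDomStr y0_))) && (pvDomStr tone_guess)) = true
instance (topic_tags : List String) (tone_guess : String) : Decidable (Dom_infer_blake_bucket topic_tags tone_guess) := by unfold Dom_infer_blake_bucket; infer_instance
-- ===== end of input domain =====

-- B replaces A's four ordered set-intersection branches by one min-fold over a tag→priority
-- table plus a priority→bucket lookup (objective: simpler).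

-- shared normalization: str(item).strip().lower()
def pvNorm (s : String) : String := PySem.Str.lower (PySem.Str.strip s)

-- ===== PORT A =====
def infer_blake_bucket (topic_tags : List String) (tone_guess : String) : String :=
  let tags : PySem.Set String := PySem.Set.ofList (topic_tags.map pvNorm)
  let tone : String := pvNorm (if tone_guess = "" then "" else tone_guess)
  if PySem.Set.inter tags (PySem.Set.ofList ["depression", "anxiety", "burnout", "healing"]) ≠ [] then
    "crisis_and_identity_reset"
  else if PySem.Set.inter tags (PySem.Set.ofList ["self_worth"]) ≠ [] then
    "enough_era"
  else if PySem.Set.inter tags (PySem.Set.ofList ["purpose"]) ≠ [] then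
    "origin_and_revolution"
  else if PySem.Set.inter tags (PySem.Set.ofList ["relationships"]) ≠ [] then
    "enough_era"
  else if PySem.Set.contains (PySem.Set.ofList ["vulnerable", "reflective"]) tone then
    "enough_era"
  else
    "scale_and_public_impact"

-- ===== PORT B =====
def pvPriority : PySem.Dict String Int := PySem.Dict.ofList
  [("depression", 0), ("anxiety", 0), ("burnout", 0), ("healing", 0),
   ("self_worth", 1), ("purpose", 2), ("relationships", 3)]

def pvBucket : PySem.Dict Int String := PySem.Dict.ofList
  [(0, "crisis_and_identity_reset"), (1, "enough_era"),
   (2, "origin_and_revolution"), (3, "enough_era")]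

def infer_blake_bucket_alt (topic_tags : List String) (tone_guess : String) : String :=
  let best : Int := topic_tags.foldl
    (fun best item => min best (PySem.Dict.getD pvPriority (pvNorm item) 4)) 4
  -- 'if best in _BUCKET: return _BUCKET[best]' = one guarded lookup, i.e. a match on get?
  match PySem.Dict.get? pvBucket best with
  | some b => b
  | none =>
    if ["vulnerable", "reflective"].contains (pvNorm (if tone_guess = "" then "" else tone_guess)) then
      "enough_era"
    else
      "scale_and_public_impact"

-- ===== PRECONDITION & SPEC =====
def Spec_infer_blake_bucket (topic_tags : List String) (tone_guess : String) (out : String) : Prop := out = infer_blake_bucket_alt topic_tags tone_guess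
instance (topic_tags : List String) (tone_guess : String) (out : String) : Decidable (Spec_infer_blake_bucket topic_tags tone_guess out) := by unfold Spec_infer_blake_bucket; infer_instance

-- ===== CLAIM (what is proved, stated in full; the proofs are below) =====
def Claim_equal_infer_blake_bucket : Prop := ∀ (topic_tags : List String) (tone_guess : String), Dom_infer_blake_bucket topic_tags tone_guess → Spec_infer_blake_bucket topic_tags tone_guess (infer_blake_bucket topic_tags tone_guess)

-- ===== LEMMAS AND PROOFS =====

def pvPrio (s : String) : Int := PySem.Dict.getD pvPriority s 4

lemma pvPrio_eq (s : String) : pvPrio s =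
    if s = "depression" then 0 else if s = "anxiety" then 0 else if s = "burnout" then 0
    else if s = "healing" then 0 else if s = "self_worth" then 1 else if s = "purpose" then 2
    else if s = "relationships" then 3 else 4 := by
  have h : pvPriority = PySem.Dict.mk
    [("depression", 0), ("anxiety", 0), ("burnout", 0), ("healing", 0),
     ("self_worth", 1), ("purpose", 2), ("relationships", 3)] := by decide
  simp only [pvPrio, h, PySem.Dict.getD, PySem.Dict.get?_mk_cons, beq_iff_eq]
  have hc : ∀ a b : String, (a = b) = (b = a) := fun a b => propext ⟨Eq.symm, Eq.symm⟩
  simp only [hc]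
  split_ifs <;> simp [PySem.Dict.get?]

lemma pvPrio_cases (s : String) :
    pvPrio s = 0 ∨ pvPrio s = 1 ∨ pvPrio s = 2 ∨ pvPrio s = 3 ∨ pvPrio s = 4 := by
  rw [pvPrio_eq]; split_ifs <;> simp

lemma pvPrio_zero (s : String) :
    s ∈ (["depression", "anxiety", "burnout", "healing"] : List String) ↔ pvPrio s = 0 := by
  rw [pvPrio_eq]; split_ifs <;> simp_all

lemma pvPrio_one (s : String) :
    s ∈ (["self_worth"] : List String) ↔ pvPrio s = 1 := by
  rw [pvPrio_eq]; split_ifs <;> simp_all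

lemma pvPrio_two (s : String) :
    s ∈ (["purpose"] : List String) ↔ pvPrio s = 2 := by
  rw [pvPrio_eq]; split_ifs <;> simp_all

lemma pvPrio_three (s : String) :
    s ∈ (["relationships"] : List String) ↔ pvPrio s = 3 := by
  rw [pvPrio_eq]; split_ifs <;> simp_all

lemma inter_ne_nil (L G : List String) :
    (PySem.Set.inter (PySem.Set.ofList L) (PySem.Set.ofList G) ≠ ([] : List String)) ↔
      ∃ x ∈ L, x ∈ G := by
  constructor
  · intro h
    obtain ⟨x, hx⟩ := List.exists_mem_of_ne_nil _ h
    have hm := (PySem.Set.mem_inter _ _ _).1 hx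
    exact ⟨x, (PySem.Set.mem_ofList _ _).1 hm.1, (PySem.Set.mem_ofList _ _).1 hm.2⟩
  · rintro ⟨x, hxL, hxG⟩ h
    have hm : x ∈ PySem.Set.inter (PySem.Set.ofList L) (PySem.Set.ofList G) :=
      (PySem.Set.mem_inter _ _ _).2 ⟨(PySem.Set.mem_ofList _ _).2 hxL, (PySem.Set.mem_ofList _ _).2 hxG⟩
    rw [h] at hm
    exact absurd hm (List.not_mem_nil)

-- common canonical form of both programs
def pvCanon (topic_tags : List String) (tone_guess : String) : String :=
  if ∃ i ∈ topic_tags, pvPrio (pvNorm i) = 0 then "crisis_and_identity_reset"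
  else if ∃ i ∈ topic_tags, pvPrio (pvNorm i) = 1 then "enough_era"
  else if ∃ i ∈ topic_tags, pvPrio (pvNorm i) = 2 then "origin_and_revolution"
  else if ∃ i ∈ topic_tags, pvPrio (pvNorm i) = 3 then "enough_era"
  else if ["vulnerable", "reflective"].contains (pvNorm tone_guess) then "enough_era"
  else "scale_and_public_impact"

lemma or_empty (s : String) : (if s = "" then "" else s) = s := by
  split_ifs with h
  · exact h.symm
  · rfl

lemma foldl_min (l : List String) (b : Int) (hb : b ≤ 4) :
    l.foldl (fun b item => min b (pvPrio (pvNorm item))) b =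
      min b (l.foldl (fun b item => min b (pvPrio (pvNorm item))) 4) := by
  induction l generalizing b with
  | nil => simp; omega
  | cons t l ih =>
      simp only [List.foldl_cons]
      rw [ih (min b (pvPrio (pvNorm t))) (by omega),
          ih (min 4 (pvPrio (pvNorm t))) (by omega)]
      omega

lemma best_char (l : List String) :
    l.foldl (fun b item => min b (pvPrio (pvNorm item))) 4 =
      if ∃ i ∈ l, pvPrio (pvNorm i) = 0 then 0
      else if ∃ i ∈ l, pvPrio (pvNorm i) = 1 then 1
      else if ∃ i ∈ l, pvPrio (pvNorm i) = 2 then 2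
      else if ∃ i ∈ l, pvPrio (pvNorm i) = 3 then 3
      else 4 := by
  induction l with
  | nil => simp
  | cons t l ih =>
      simp only [List.foldl_cons]
      rw [foldl_min l (min 4 (pvPrio (pvNorm t))) (by omega), ih]
      simp only [List.exists_mem_cons_iff]
      rcases pvPrio_cases (pvNorm t) with h | h | h | h | h <;>
        rw [h] <;> simp <;> split_ifs <;> omega

lemma cond_iff (tags : List String) (G : List String) (P : String → Prop)
    (hG : ∀ s, s ∈ G ↔ P s) :
    (PySem.Set.inter (PySem.Set.ofList (tags.map pvNorm)) (PySem.Set.ofList G) ≠ ([] : List String)) ↔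
      ∃ i ∈ tags, P (pvNorm i) := by
  rw [inter_ne_nil]
  constructor
  · rintro ⟨x, hx, hxG⟩
    obtain ⟨i, hi, rfl⟩ := List.mem_map.1 hx
    exact ⟨i, hi, (hG _).1 hxG⟩
  · rintro ⟨i, hi, hp⟩
    exact ⟨pvNorm i, List.mem_map.2 ⟨i, hi, rfl⟩, (hG _).2 hp⟩

lemma A_canon (topic_tags : List String) (tone_guess : String) :
    infer_blake_bucket topic_tags tone_guess = pvCanon topic_tags tone_guess := by
  unfold infer_blake_bucket pvCanon
  have hv : PySem.Set.ofList ["vulnerable", "reflective"] = ["vulnerable", "reflective"] := by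
    decide
  simp only [or_empty,
    cond_iff topic_tags _ _ pvPrio_zero, cond_iff topic_tags _ _ pvPrio_one,
    cond_iff topic_tags _ _ pvPrio_two, cond_iff topic_tags _ _ pvPrio_three,
    PySem.Set.contains_eq_listContains, hv]

lemma B_canon (topic_tags : List String) (tone_guess : String) :
    infer_blake_bucket_alt topic_tags tone_guess = pvCanon topic_tags tone_guess := by
  unfold infer_blake_bucket_alt pvCanon
  rw [show (fun (best : Int) item => min best (PySem.Dict.getD pvPriority (pvNorm item) 4)) =
        (fun b item => min b (pvPrio (pvNorm item))) from rfl, best_char]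
  simp only [or_empty]
  split_ifs <;> rfl

-- ===== VERDICT (by name: the statement is the Claim_ definition above) =====
theorem infer_blake_bucket_spec : Claim_equal_infer_blake_bucket := by
  intro topic_tags tone_guess _
  unfold Spec_infer_blake_bucket
  rw [A_canon, B_canon]
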